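-- pv_equiv track=rewrite | github.com/pobugi/leetcode | 1456_maximum_number_of_vowels_in_a_substring_of_given_length/solution2.py | solve
-- ===== SOURCE A (Python) =====
-- VOWELS = ["a", "e", "i", "o", "u"]
--
-- def solve(s: str, k: int):
--     prev_slice = s[:k]
--     curr_count = 0
--     for letter in prev_slice:
--         if letter in VOWELS:
--             curr_count += 1
--     max_count = curr_count
--     prev_first = s[0]
--
--     for i in range(1, len(s) - k + 1):
--         curr_last = s[i + k - 1]
--         if prev_first in VOWELS:
--             curr_count -= 1
--         if curr_last in VOWELS:
--             curr_count += 1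
--         max_count = max(curr_count, max_count)
--         prev_first = s[i]
--     return max_count
-- ===== SOURCE B (Python) =====
-- def solve(s: str, k: int):
--     vowels = set("aeiou")
--     p = [0]
--     for c in s:
--         p.append(p[-1] + (c in vowels))
--     n = len(s)
--     m = min(k, n)
--     return max(p[i + m] - p[i] for i in range(n - m + 1))
-- ===== Notes on version B (the rewrite author's own statement) =====
-- stated objective: alternative
-- what changed: Replaces A's sliding-window loop with explicit first/last-letter bookkeeping by a prefix-sum array of vowel counts and a single max over the window differences p[i+m]-p[i].
import Mathlib
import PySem

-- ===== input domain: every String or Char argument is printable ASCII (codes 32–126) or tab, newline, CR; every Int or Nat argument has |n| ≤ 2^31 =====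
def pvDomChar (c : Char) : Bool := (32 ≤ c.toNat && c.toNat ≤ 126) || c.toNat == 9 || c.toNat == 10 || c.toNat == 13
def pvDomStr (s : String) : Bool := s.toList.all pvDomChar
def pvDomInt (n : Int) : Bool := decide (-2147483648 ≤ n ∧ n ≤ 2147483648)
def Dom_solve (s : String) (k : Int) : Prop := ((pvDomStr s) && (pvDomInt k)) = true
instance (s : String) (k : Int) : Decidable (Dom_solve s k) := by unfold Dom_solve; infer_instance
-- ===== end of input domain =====

-- B replaces A's sliding window (first/last-letter bookkeeping) by a prefix-sum array of
-- vowel counts and one max over the window differences; same O(n) cost, a different algorithm.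

-- ===== PORT A =====
def pvVowels : List Char := ['a', 'e', 'i', 'o', 'u']

def solve (s : String) (k : Int) : Int :=
  let cs := s.toList
  let prev_slice := PySem.List.slice cs none (some k)
  let curr_count : Int := prev_slice.foldl (fun cc c => if c ∈ pvVowels then cc + 1 else cc) 0
  let max_count := curr_count
  let prev_first := PySem.List.pyGetD cs 0 ' '     -- s[0]: IndexError on empty s, excluded by Pre_
  let st := (PySem.List.pyRange 1 ((cs.length : Int) - k + 1) 1).foldl
      (fun (st : Int × Int × Char) i =>
        let curr_last := PySem.List.pyGetD cs (i + k - 1) ' '   -- in range whenever Pre_ holds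
        let cc := if st.2.2 ∈ pvVowels then st.1 - 1 else st.1
        let cc2 := if curr_last ∈ pvVowels then cc + 1 else cc
        (cc2, max cc2 st.2.1, PySem.List.pyGetD cs i ' '))      -- prev_first = s[i]
      (curr_count, max_count, prev_first)
  st.2.1

-- ===== PORT B =====
def solve_alt (s : String) (k : Int) : Int :=
  let cs := s.toList
  let p : List Int := cs.foldl
      (fun ps c => ps ++ [PySem.List.pyGetD ps (-1) 0 +
                          (if c ∈ PySem.Set.ofList pvVowels then 1 else 0)]) [0]
  let n : Int := cs.length
  let m := min k n
  let vals := (PySem.List.pyRange 0 (n - m + 1) 1).map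
      (fun i => PySem.List.pyGetD p (i + m) 0 - PySem.List.pyGetD p i 0)
  (PySem.List.max? vals (fun x => x)).getD 0      -- max(...): the range is nonempty under Pre_

-- ===== PRECONDITION & SPEC =====
-- Pre_ excludes exactly the inputs on which Python A raises IndexError: the empty string
-- (s[0]) and k ≤ 0 (the final prev_first = s[i] of the last iteration is out of range).
def Pre_solve (s : String) (k : Int) : Prop := s.toList ≠ [] ∧ 1 ≤ k
instance (s : String) (k : Int) : Decidable (Pre_solve s k) := by unfold Pre_solve; infer_instance
def pvWitness_solve : String × Int := ("ae", 2)

def Spec_solve (s : String) (k : Int) (out : Int) : Prop := out = solve_alt s k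
instance (s : String) (k : Int) (out : Int) : Decidable (Spec_solve s k out) := by unfold Spec_solve; infer_instance

-- ===== CLAIM (what is proved, stated in full; the proofs are below) =====
def Claim_equal_solve : Prop := ∀ (s : String) (k : Int), Dom_solve s k → Pre_solve s k → Spec_solve s k (solve s k)

-- ===== LEMMAS AND PROOFS =====

-- vowel test as a Bool predicate
def pvIsV (c : Char) : Bool := decide (c ∈ pvVowels)

-- number of vowels among the first j characters
def pvCnt (cs : List Char) (j : Nat) : Int := ((cs.take j).countP pvIsV : Nat)

-- vowel count of the window [j, j+K)
def pvW (cs : List Char) (K j : Nat) : Int := pvCnt cs (j + K) - pvCnt cs j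

-- running maximum of pvW over 0..t
def pvMx (cs : List Char) (K : Nat) : Nat → Int
  | 0 => pvW cs K 0
  | t + 1 => max (pvW cs K (t + 1)) (pvMx cs K t)

lemma pvSet_ofList : PySem.Set.ofList pvVowels = pvVowels := by decide

lemma pvCnt_zero (cs : List Char) : pvCnt cs 0 = 0 := by simp [pvCnt]

lemma pvCnt_succ (cs : List Char) (j : Nat) (h : j < cs.length) :
    pvCnt cs (j + 1) = pvCnt cs j + (if cs[j] ∈ pvVowels then 1 else 0) := by
  have htake : cs.take (j + 1) = cs.take j ++ [cs[j]] := by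
    rw [List.take_add_one, List.getElem?_eq_getElem h]
    rfl
  unfold pvCnt
  rw [htake, List.countP_append]
  push_cast
  by_cases hv : cs[j] ∈ pvVowels <;> simp [pvIsV, hv]

-- the prefix list built by B's loop
lemma pvP_eq (cs : List Char) :
    cs.foldl (fun ps c => ps ++ [PySem.List.pyGetD ps (-1) 0 +
        (if c ∈ PySem.Set.ofList pvVowels then 1 else 0)]) [0]
      = (List.range (cs.length + 1)).map (pvCnt cs) := by
  induction cs using List.reverseRecOn with
  | nil => simp [pvCnt]
  | append_singleton cs c ih =>
    rw [List.foldl_append, ih]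
    have hcong : (List.range (cs.length + 1)).map (pvCnt cs)
        = (List.range (cs.length + 1)).map (pvCnt (cs ++ [c])) := by
      apply List.map_congr_left
      intro j hj
      rw [List.mem_range] at hj
      simp [pvCnt, List.take_append_of_le_length (by omega : j ≤ cs.length)]
    have hlast : (List.range (cs.length + 1)).map (pvCnt cs)
        = (List.range cs.length).map (pvCnt cs) ++ [pvCnt cs cs.length] := by
      rw [List.range_succ, List.map_append]
      simp
    simp only [List.foldl_cons, List.foldl_nil]
    have hnew : pvCnt cs cs.length + (if c ∈ PySem.Set.ofList pvVowels then 1 else 0)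
        = pvCnt (cs ++ [c]) (cs.length + 1) := by
      rw [pvSet_ofList]
      have hsame : pvCnt (cs ++ [c]) cs.length = pvCnt cs cs.length := by
        simp [pvCnt, List.take_append_of_le_length (le_refl cs.length)]
      rw [pvCnt_succ (cs ++ [c]) cs.length (by simp), hsame]
      congr 1
      simp
    rw [hlast, PySem.List.pyGetD_neg_one_append_singleton, ← hlast, hcong, hnew]
    rw [show (cs ++ [c]).length = cs.length + 1 from by simp, List.range_succ, List.map_append,
        List.range_succ, List.map_append]
    rw [List.range_succ, List.map_append]
    simp

-- B's running max: foldl max over the remaining windows equals pvMx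
lemma pvFoldMax (cs : List Char) (K : Nat) (N : Nat) :
    ((List.range N).map (fun j => pvW cs K (j + 1))).foldl max (pvW cs K 0) = pvMx cs K N := by
  induction N with
  | zero => simp [pvMx]
  | succ N ih =>
    rw [List.range_succ, List.map_append, List.foldl_append, ih]
    simp [pvMx, max_comm]

-- A's loop invariant
lemma pvLoopInv (cs : List Char) (K : Nat) (hK : 1 ≤ K) (hKn : K < cs.length)
    (t : Nat) (ht : t ≤ cs.length - K) :
    (PySem.List.pyRange 1 ((t : Int) + 1) 1).foldl
      (fun (st : Int × Int × Char) i =>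
        let curr_last := PySem.List.pyGetD cs (i + (K : Int) - 1) ' '
        let cc := if st.2.2 ∈ pvVowels then st.1 - 1 else st.1
        let cc2 := if curr_last ∈ pvVowels then cc + 1 else cc
        (cc2, max cc2 st.2.1, PySem.List.pyGetD cs i ' '))
      (pvW cs K 0, pvW cs K 0, cs.getD 0 ' ')
    = (pvW cs K t, pvMx cs K t, cs.getD t ' ') := by
  induction t with
  | zero => simp [PySem.List.pyRange_one_eq_nil, pvMx]
  | succ t ih =>
    have ht' : t ≤ cs.length - K := by omega
    have hrange : PySem.List.pyRange 1 ((t : Int) + 1 + 1) 1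
        = PySem.List.pyRange 1 ((t : Int) + 1) 1 ++ [(t : Int) + 1] := by
      have := PySem.List.pyRange_one_succ_right (a := 1) (b := (t : Int) + 1) (by omega)
      simpa using this
    rw [show ((t + 1 : Nat) : Int) + 1 = (t : Int) + 1 + 1 by push_cast; ring, hrange,
        List.foldl_append, ih ht']
    simp only [List.foldl_cons, List.foldl_nil]
    have hidx1 : (t : Int) + 1 + (K : Int) - 1 = ((t + K : Nat) : Int) := by push_cast; ring
    have htK : t + K < cs.length := by omega
    have htlt : t < cs.length := by omega
    have ht1 : t + 1 < cs.length := by omega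
    have hlast : PySem.List.pyGetD cs ((t : Int) + 1 + (K : Int) - 1) ' ' = cs[t + K] := by
      rw [hidx1, PySem.List.pyGetD_natCast]
      exact List.getD_eq_getElem cs ' ' htK
    have hpf : PySem.List.pyGetD cs ((t : Int) + 1) ' ' = cs.getD (t + 1) ' ' := by
      rw [show (t : Int) + 1 = ((t + 1 : Nat) : Int) by push_cast; ring,
          PySem.List.pyGetD_natCast]
    have hgd : cs.getD t ' ' = cs[t] := List.getD_eq_getElem cs ' ' htlt
    have hW : pvW cs K (t + 1)
        = (if cs[t] ∈ pvVowels then pvW cs K t - 1 else pvW cs K t)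
          + (if cs[t + K] ∈ pvVowels then 1 else 0) := by
      have h1 : pvCnt cs (t + 1) = pvCnt cs t + (if cs[t] ∈ pvVowels then 1 else 0) :=
        pvCnt_succ cs t htlt
      have h2 : pvCnt cs (t + 1 + K) = pvCnt cs (t + K) + (if cs[t + K] ∈ pvVowels then 1 else 0) := by
        have := pvCnt_succ cs (t + K) htK
        rw [show t + 1 + K = t + K + 1 by ring, this]
      unfold pvW
      rw [h1, h2]
      split_ifs <;> ring
    rw [hlast, hgd, hpf]
    have hRes : (if cs[t + K] ∈ pvVowels then
          (if cs[t] ∈ pvVowels then pvW cs K t - 1 else pvW cs K t) + 1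
        else (if cs[t] ∈ pvVowels then pvW cs K t - 1 else pvW cs K t)) = pvW cs K (t + 1) := by
      rw [hW]; split_ifs <;> ring
    simp only [hRes]
    have : max (pvW cs K (t + 1)) (pvMx cs K t) = pvMx cs K (t + 1) := rfl
    rw [this]

-- evaluate B under Pre_ : it is pvMx over all windows of length min k n
lemma pvB_eval (s : String) (k : Int) (h : Pre_solve s k) :
    solve_alt s k = pvMx s.toList (min k (s.toList.length : Int)).toNat
      (s.toList.length - (min k (s.toList.length : Int)).toNat) := by
  obtain ⟨hne, hk⟩ := h
  set cs := s.toList with hcs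
  have hn : 0 < cs.length := List.length_pos_of_ne_nil hne
  set K : Nat := (min k (cs.length : Int)).toNat with hKdef
  have hmK : min k (cs.length : Int) = (K : Int) := by
    rw [hKdef]; omega
  have hK1 : 1 ≤ K := by omega
  have hKle : K ≤ cs.length := by omega
  simp only [solve_alt]
  rw [← hcs, pvP_eq cs, hmK]
  have hub : (cs.length : Int) - (K : Int) + 1 = ((cs.length - K + 1 : Nat) : Int) := by push_cast; omega
  rw [hub, PySem.List.pyRange_zero_natCast]
  have hmap : ∀ j ∈ List.range (cs.length - K + 1),
      (fun i => PySem.List.pyGetD ((List.range (cs.length + 1)).map (pvCnt cs)) (i + (K:Int)) 0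
              - PySem.List.pyGetD ((List.range (cs.length + 1)).map (pvCnt cs)) i 0) ((j : Nat) : Int)
      = pvW cs K j := by
    intro j hj
    rw [List.mem_range] at hj
    have hjK : j + K < cs.length + 1 := by omega
    have hjlt : j < cs.length + 1 := by omega
    simp only [show ((j : Nat) : Int) + (K : Int) = ((j + K : Nat) : Int) by push_cast; ring,
      PySem.List.pyGetD_natCast]
    rw [List.getD_eq_getElem _ 0 (by simpa using hjK), List.getD_eq_getElem _ 0 (by simpa using hjlt)]
    simp [pvW]
  rw [List.map_map]
  rw [show ((fun i => PySem.List.pyGetD ((List.range (cs.length + 1)).map (pvCnt cs)) (i + (K:Int)) 0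
              - PySem.List.pyGetD ((List.range (cs.length + 1)).map (pvCnt cs)) i 0) ∘ (fun j : Nat => (j : Int)))
      = fun j : Nat => PySem.List.pyGetD ((List.range (cs.length + 1)).map (pvCnt cs)) (((j:Nat):Int) + (K:Int)) 0
              - PySem.List.pyGetD ((List.range (cs.length + 1)).map (pvCnt cs)) ((j:Nat):Int) 0 from rfl]
  rw [List.map_congr_left hmap]
  have hsplit : (List.range (cs.length - K + 1)).map (pvW cs K)
      = pvW cs K 0 :: (List.range (cs.length - K)).map (fun j => pvW cs K (j + 1)) := by
    rw [List.range_succ_eq_map]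
    simp [Function.comp, Nat.succ_eq_add_one]
  rw [hsplit, PySem.List.max?_id_cons]
  simp [pvFoldMax cs K (cs.length - K)]

-- ===== VERDICT (by name: the statement is the Claim_ definition above) =====
theorem solve_spec : Claim_equal_solve := by
  intro s k _ hpre
  unfold Spec_solve
  obtain ⟨hne, hk⟩ := hpre
  set cs := s.toList with hcs
  have hn : 0 < cs.length := List.length_pos_of_ne_nil hne
  rw [pvB_eval s k ⟨hne, hk⟩]
  by_cases hbig : (cs.length : Int) ≤ k
  · -- k ≥ n: A's loop is empty; the answer is the vowel count of the whole string
    have hmK : (min k (cs.length : Int)).toNat = cs.length := by omega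
    rw [← hcs, hmK]
    simp only [Nat.sub_self, pvMx, pvW, pvCnt_zero, sub_zero]
    simp only [solve]
    rw [← hcs]
    rw [PySem.List.pyRange_one_eq_nil (by omega)]
    simp only [List.foldl_nil]
    rw [PySem.List.slice_to cs (by omega : (0:Int) ≤ k),
        List.take_of_length_le (by omega : cs.length ≤ k.toNat),
        PySem.List.foldl_ite_add_one]
    simp [pvCnt, List.take_of_length_le (le_refl cs.length)]
    rfl
  · -- 1 ≤ k < n: the sliding-window loop, by the invariant
    rw [not_le] at hbig
    set K : Nat := k.toNat with hKdef
    have hmK : (min k (cs.length : Int)).toNat = K := by omega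
    have hK1 : 1 ≤ K := by omega
    have hKn : K < cs.length := by omega
    rw [← hcs, hmK]
    simp only [solve]
    rw [← hcs]
    have hcc : (PySem.List.slice cs none (some k)).foldl
        (fun cc c => if c ∈ pvVowels then cc + 1 else cc) (0 : Int) = pvW cs K 0 := by
      rw [PySem.List.slice_to cs (by omega : (0:Int) ≤ k), PySem.List.foldl_ite_add_one]
      simp [pvW, pvCnt, hKdef]
      rfl
    have hpf : PySem.List.pyGetD cs 0 ' ' = cs.getD 0 ' ' := by
      rw [show (0 : Int) = ((0 : Nat) : Int) by rfl, PySem.List.pyGetD_natCast]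
    have hkK : k = (K : Int) := by omega
    have hub : (cs.length : Int) - k + 1 = ((cs.length - K : Nat) : Int) + 1 := by omega
    rw [hcc, hpf, hub, hkK]
    rw [pvLoopInv cs K hK1 hKn (cs.length - K) (le_refl _)]
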